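-- pv_equiv track=rewrite | github.com/maria-pugacheva/LeetCode | src/python/_01_easy/_2148_count-elements-with-strictly-smaller-and-greater-elements.py | solution_three
-- ===== SOURCE A (Python) =====
-- from typing import List
--
-- def solution_three(nums: List[int]) -> int:
--     """Given an integer array nums, return the number of elements that
--     have both a strictly smaller and a strictly greater element appear
--     in nums.
--
--     Examples:
--         >>> solution_three([1, 1, 1, 1])
--         0
--         >>> solution_three([-3, 3, 3, 90])
--         2
--         >>> solution_three([11, 7, 2, 15])
--         2
--     """
--     mx = float('-inf')
--     mn = float('inf')
--     cnt = [0, 0]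
--     for n in nums:
--         if n > mx:
--             mx = n
--             cnt[0] = 1
--         elif n == mx:
--             cnt[0] += 1
--         if n < mn:
--             mn = n
--             cnt[1] = 1
--         elif n == mn:
--             cnt[1] += 1
--     return len(nums) - sum(cnt) if mx != mn else 0
-- ===== SOURCE B (Python) =====
-- def solution_three(nums):
--     if not nums:
--         return 0
--     mn = min(nums)
--     mx = max(nums)
--     return sum(1 for x in nums if mn < x < mx)
-- ===== Notes on version B (the rewrite author's own statement) =====
-- stated objective: simpler
-- what changed: A's single fused pass tracking running min/max with their occurrence counts and a final subtraction is replaced by two plain reductions (min, max) followed by a direct filtering count of the strictly-in-between elements.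
import Mathlib
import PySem

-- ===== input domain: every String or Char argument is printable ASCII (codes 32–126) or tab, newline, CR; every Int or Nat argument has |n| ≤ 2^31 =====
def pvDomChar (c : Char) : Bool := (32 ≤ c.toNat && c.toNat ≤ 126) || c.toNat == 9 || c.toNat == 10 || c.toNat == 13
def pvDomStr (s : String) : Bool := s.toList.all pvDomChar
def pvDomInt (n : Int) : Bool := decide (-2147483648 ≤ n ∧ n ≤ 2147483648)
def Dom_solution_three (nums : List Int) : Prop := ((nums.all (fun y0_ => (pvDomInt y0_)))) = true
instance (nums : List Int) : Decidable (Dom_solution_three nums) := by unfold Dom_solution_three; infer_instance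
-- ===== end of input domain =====

-- B replaces A's fused running-min/max-with-counts pass by two reductions (min, max) and a filtering count; return value equivalence only.

-- ===== PORT A =====
-- A's float sentinels -inf/+inf are modelled as Option Int 'none' (n > -inf and n < +inf always hold,
-- and mx != mn holds while both are still infinities, i.e. on the empty list).
def stepA (s : Option Int × Option Int × Int × Int) (n : Int) :
    Option Int × Option Int × Int × Int :=
  let (mx, mn, c0, c1) := s
  let (mx, c0) :=
    match mx with
    | none => (some n, (1 : Int))                 -- n > -inf: mx = n, cnt[0] = 1
    | some m =>
      if n > m then (some n, (1 : Int))
      else if n = m then (some m, c0 + 1)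
      else (some m, c0)
  let (mn, c1) :=
    match mn with
    | none => (some n, (1 : Int))                 -- n < +inf: mn = n, cnt[1] = 1
    | some m =>
      if n < m then (some n, (1 : Int))
      else if n = m then (some m, c1 + 1)
      else (some m, c1)
  (mx, mn, c0, c1)

def solution_three (nums : List Int) : Int :=
  let st := nums.foldl stepA (none, none, 0, 0)
  match st with
  | (some a, some b, c0, c1) =>
      if a ≠ b then (nums.length : Int) - (c0 + c1) else 0
  | (_, _, c0, c1) => (nums.length : Int) - (c0 + c1)   -- both still infinite (empty list): -inf ≠ +inf

-- ===== PORT B =====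
def solution_three_alt (nums : List Int) : Int :=
  if nums = [] then 0
  else
    -- min(nums) / max(nums); nums ≠ [] so min?/max? are `some` and the .getD default is unreachable
    let mn := (PySem.List.min? nums (fun x => x)).getD 0
    let mx := (PySem.List.max? nums (fun x => x)).getD 0
    (nums.countP (fun x => decide (mn < x ∧ x < mx)) : Int)

-- ===== PRECONDITION & SPEC =====
def Spec_solution_three (nums : List Int) (out : Int) : Prop := out = solution_three_alt nums
instance (nums : List Int) (out : Int) : Decidable (Spec_solution_three nums out) := by unfold Spec_solution_three; infer_instance

-- ===== CLAIM (what is proved, stated in full; the proofs are below) =====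
def Claim_equal_solution_three : Prop := ∀ (nums : List Int), Dom_solution_three nums → Spec_solution_three nums (solution_three nums)

-- ===== LEMMAS AND PROOFS =====

-- One step of A's loop, once both extrema are real numbers.
theorem stepA_some (M m c0 c1 n : Int) :
    stepA (some M, some m, c0, c1) n =
      (some (max M n), some (min m n),
       (if n > M then 1 else if n = M then c0 + 1 else c0),
       (if n < m then 1 else if n = m then c1 + 1 else c1)) := by
  simp only [stepA]
  split_ifs <;> simp_all [Prod.ext_iff] <;> omega

-- Characterization of A's loop once both extrema are real numbers.
theorem loopA_char (l : List Int) (M m c0 c1 : Int) :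
    l.foldl stepA (some M, some m, c0, c1) =
      (some (l.foldl max M), some (l.foldl min m),
       (if l.foldl max M = M then c0 else 0) + (l.count (l.foldl max M) : Int),
       (if l.foldl min m = m then c1 else 0) + (l.count (l.foldl min m) : Int)) := by
  induction l generalizing M m c0 c1 with
  | nil => simp
  | cons n t ih =>
    have hM := (PySem.List.le_foldl_max t (max M n)).1
    have hm := (PySem.List.foldl_min_le t (min m n)).1
    rw [List.foldl_cons, stepA_some, ih]
    simp only [List.foldl_cons, List.count_cons, beq_iff_eq, Prod.mk.injEq]
    refine ⟨trivial, trivial, ?_, ?_⟩ <;> push_cast <;> split_ifs <;> omega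

-- Every element is min, max, or strictly between; counting them partitions the length.
theorem count_split (l : List Int) (m T : Int) (h : ∀ x ∈ l, m ≤ x ∧ x ≤ T) (hne : m ≠ T) :
    (l.length : Int) =
      (l.count T : Int) + (l.count m : Int) +
        (l.countP (fun x => decide (m < x ∧ x < T)) : Int) := by
  induction l with
  | nil => simp
  | cons n t ih =>
    have hn := h n List.mem_cons_self
    have ih' := ih (fun x hx => h x (List.mem_cons_of_mem n hx))
    simp only [List.length_cons, List.count_cons, List.countP_cons, beq_iff_eq,
      decide_eq_true_eq]
    push_cast
    split_ifs <;> omega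

theorem solution_three_eq (nums : List Int) :
    solution_three nums = solution_three_alt nums := by
  cases nums with
  | nil => simp [solution_three, solution_three_alt]
  | cons n t =>
    have hstep : stepA (none, none, 0, 0) n = (some n, some n, 1, 1) := by
      simp [stepA]
    have hchar := loopA_char t n n 1 1
    have hmaxb := (PySem.List.le_foldl_max t n).1
    have hmaxm := (PySem.List.le_foldl_max t n).2
    have hminb := (PySem.List.foldl_min_le t n).1
    have hminm := (PySem.List.foldl_min_le t n).2
    set T := t.foldl max n with hT
    set m := t.foldl min n with hm
    have hbound : ∀ x ∈ n :: t, m ≤ x ∧ x ≤ T := by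
      intro x hx
      rcases List.mem_cons.mp hx with rfl | hx
      · exact ⟨hminb, hmaxb⟩
      · exact ⟨hminm x hx, hmaxm x hx⟩
    have hcT : (if T = n then (1:Int) else 0) + (t.count T : Int) = ((n :: t).count T : Int) := by
      simp only [List.count_cons, beq_iff_eq]
      push_cast
      split_ifs <;> omega
    have hcm : (if m = n then (1:Int) else 0) + (t.count m : Int) = ((n :: t).count m : Int) := by
      simp only [List.count_cons, beq_iff_eq]
      push_cast
      split_ifs <;> omega
    unfold solution_three solution_three_alt
    rw [List.foldl_cons, hstep, hchar]
    simp only [PySem.List.min?_id_cons, PySem.List.max?_id_cons, Option.getD_some, ← hT, ← hm,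
      if_neg (List.cons_ne_nil n t)]
    by_cases hne : T = m
    · -- all elements equal: A returns 0 via the else-branch, B counts an empty filter
      rw [if_neg (by simp [hne])]
      have hz : List.countP (fun x => decide (m < x ∧ x < T)) (n :: t) = 0 := by
        rw [List.countP_eq_zero]
        intro x hx
        have hb := hbound x hx
        simp only [decide_eq_true_eq, not_and]
        omega
      exact_mod_cast hz.symm
    · rw [if_pos hne, hcT, hcm]
      have := count_split (n :: t) m T hbound (fun h => hne h.symm)
      omega

-- ===== VERDICT (by name: the statement is the Claim_ definition above) =====
theorem solution_three_spec : Claim_equal_solution_three := by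
  intro nums _
  exact solution_three_eq nums
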